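-- pv_equiv track=rewrite | github.com/EraCat/hse_cbab2025_hw | src/algo/hw9.py | find_sum_between
-- ===== SOURCE A (Python) =====
-- from collections import deque
--
-- def find_sum_between(graph):
--     def bfs(u, graph):
--         dist = [-1] * len(graph)
--         dist[u] = 0
--         queue = deque([u])
--         while queue:
--             v = queue.popleft()
--             for neighbor in graph[v]:
--                 if dist[neighbor] == -1:
--                     dist[neighbor] = dist[v] + 1
--                     queue.append(neighbor)
--
--         return dist
--
--     total = 0
--     for v in range(len(graph)):
--         total += sum(bfs(v, graph))
--
--     total //= 2
--     return total
-- ===== SOURCE B (Python) =====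
-- def find_sum_between(graph):
--     n = len(graph)
--     INF = n + 1  # every real distance is at most n, so n + 1 acts as infinity
--     total = 0
--     for u in range(n):
--         dist = [INF] * n
--         dist[u] = 0
--         for _ in range(n):
--             new = dist[:]
--             for v in range(n):
--                 dv1 = dist[v] + 1
--                 for nb in graph[v]:
--                     if dv1 < new[nb]:
--                         new[nb] = dv1
--             if new == dist:
--                 break
--             dist = new
--         total += sum(d if d < INF else -1 for d in dist)
--     return total // 2
-- ===== Notes on version B (the rewrite author's own statement) =====
-- stated objective: alternative
-- what changed: Replaces the per-source BFS queue expansion with per-source synchronous Bellman-Ford: repeated relaxation rounds over the whole edge set on an INF-sentinel distance array, stopping at a fixpoint; unreachable cells stay at INF and are converted to -1 only in the final sum.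
import Mathlib
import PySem

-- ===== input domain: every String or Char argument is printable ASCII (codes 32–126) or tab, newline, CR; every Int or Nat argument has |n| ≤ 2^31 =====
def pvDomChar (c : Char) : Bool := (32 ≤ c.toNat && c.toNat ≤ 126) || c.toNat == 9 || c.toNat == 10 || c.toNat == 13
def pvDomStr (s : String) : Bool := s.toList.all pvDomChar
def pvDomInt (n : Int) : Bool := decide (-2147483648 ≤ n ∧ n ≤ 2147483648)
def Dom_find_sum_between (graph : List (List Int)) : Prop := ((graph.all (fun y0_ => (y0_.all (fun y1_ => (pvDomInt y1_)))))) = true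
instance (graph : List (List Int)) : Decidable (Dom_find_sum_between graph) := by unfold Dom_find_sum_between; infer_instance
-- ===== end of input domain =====

-- B replaces A's per-source deque BFS by per-source synchronous Bellman-Ford relaxation
-- rounds over the whole edge set (INF sentinel, fixpoint early exit); objective: alternative.

-- number of -1 cells of dist = number of still-unvisited vertices (termination measure)
def pvCount1 (dist : List Int) : Nat := dist.count (-1)

-- setting a -1 cell to a non-(-1) value removes exactly one -1
theorem pvCount1_pySetD (dist : List Int) (i v : Int)
    (hg : PySem.List.pyGet? dist i = some (-1)) (hv : v ≠ -1) :
    pvCount1 (PySem.List.pySetD dist i v) + 1 = pvCount1 dist := by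
  simp only [PySem.List.pyGet?, Option.bind_eq_some_iff] at hg
  obtain ⟨k, hk, hget⟩ := hg
  have hklt : k < dist.length := (List.getElem?_eq_some_iff.mp hget).1
  have hgk : dist[k] = -1 := (List.getElem?_eq_some_iff.mp hget).2
  simp only [PySem.List.pySetD, PySem.List.pySet?, hk, Option.map_some, Option.getD_some]
  have hset : dist.set k v = dist.take k ++ v :: dist.drop (k + 1) :=
    List.set_eq_take_cons_drop v hklt
  have hdist : dist = dist.take k ++ dist[k] :: dist.drop (k + 1) := by
    conv_lhs => rw [← List.take_append_drop k dist, ← List.getElem_cons_drop hklt]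
  unfold pvCount1
  rw [hset]; conv_rhs => rw [hdist]
  simp [List.count_append, hgk, hv]; omega

-- ===== PORT A =====
-- inner loop 'for neighbor in graph[v]': state (dist, appended queue suffix);
-- .error dist = the IndexError Python raises on an out-of-range neighbor (outside Pre_)
def pvNbrsA (dv : Int) (nbrs : List Int) (dist : List Int) (app : List Int) :
    Except (List Int) (List Int × List Int) :=
  match nbrs with
  | [] => .ok (dist, app)
  | nb :: rest =>
    match PySem.List.pyGet? dist nb with
    | none => .error dist
    | some x =>
      if x = -1 then pvNbrsA dv rest (PySem.List.pySetD dist nb (dv + 1)) (app ++ [nb])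
      else pvNbrsA dv rest dist app

theorem pvNbrsA_count (dv : Int) (hdv : (0:Int) ≤ dv) :
    ∀ (nbrs dist app d' a' : List Int),
      pvNbrsA dv nbrs dist app = .ok (d', a') →
      pvCount1 d' + a'.length ≤ pvCount1 dist + app.length := by
  intro nbrs
  induction nbrs with
  | nil =>
    intro dist app d' a' h
    simp only [pvNbrsA] at h
    injection h with h; injection h with h1 h2; subst h1; subst h2; omega
  | cons nb rest ih =>
    intro dist app d' a' h
    cases hg : PySem.List.pyGet? dist nb with
    | none => simp [pvNbrsA, hg] at h
    | some x =>
      simp only [pvNbrsA, hg] at h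
      by_cases hx : x = -1
      · rw [if_pos hx] at h
        subst hx
        have hc := pvCount1_pySetD dist nb (dv + 1) hg (by omega)
        have := ih _ _ _ _ h
        simp at this; omega
      · rw [if_neg hx] at h
        exact ih _ _ _ _ h

-- the 'while queue' loop of A's bfs; the '0 ≤ dv' guard only makes the recursion
-- total (every Python execution has dv ≥ 0 since v was enqueued with dist[v] set ≥ 0)
def pvBfsA (graph : List (List Int)) (dist : List Int) (queue : List Int) : List Int :=
  match queue with
  | [] => dist
  | v :: rest =>
    match PySem.List.pyGet? graph v with
    | none => dist
    | some nbrs =>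
      match PySem.List.pyGet? dist v with
      | none => dist
      | some dv =>
        if h : (0:Int) ≤ dv then
          match hnb : pvNbrsA dv nbrs dist [] with
          | .error d => d
          | .ok (d', app) => pvBfsA graph d' (rest ++ app)
        else dist
termination_by pvCount1 dist + queue.length
decreasing_by
  have := pvNbrsA_count dv h nbrs dist [] d' app hnb
  simp at this ⊢; omega

def find_sum_between (graph : List (List Int)) : Int :=
  let total := (PySem.List.pyRange 0 (graph.length : Int)).foldl
    (fun total v =>
      total + (pvBfsA graph
        (PySem.List.pySetD (List.replicate graph.length (-1)) v 0) [v]).sum) 0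
  PySem.Int.floordiv total 2

-- ===== PORT B =====
-- 'for nb in graph[v]: if dv1 < new[nb]: new[nb] = dv1' — one vertex's relaxations
def pvRelax (dv1 : Int) (nbrs : List Int) (new : List Int) : List Int :=
  nbrs.foldl (fun new nb =>
    match PySem.List.pyGet? new nb with
    | none => new
    | some x => if dv1 < x then PySem.List.pySetD new nb dv1 else new) new

-- body of the round's 'for v in range(n)' loop (reads the old array dist, writes new)
def pvRoundStep (graph : List (List Int)) (dist : List Int) (new : List Int) (v : Int) :
    List Int :=
  match PySem.List.pyGet? dist v with
  | none => new
  | some dv =>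
    match PySem.List.pyGet? graph v with
    | none => new
    | some nbrs => pvRelax (dv + 1) nbrs new

-- one synchronous relaxation round: 'new = dist[:]; for v in range(n): ...'
def pvRound (graph : List (List Int)) (dist : List Int) : List Int :=
  (PySem.List.pyRange 0 (graph.length : Int)).foldl (pvRoundStep graph dist) dist

-- 'for _ in range(n): new = round(dist); if new == dist: break; dist = new'
def pvLoop (graph : List (List Int)) (fuel : Nat) (dist : List Int) : List Int :=
  match fuel with
  | 0 => dist
  | f + 1 =>
    let new := pvRound graph dist
    if new = dist then dist else pvLoop graph f new

def find_sum_between_alt (graph : List (List Int)) : Int :=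
  let total := (PySem.List.pyRange 0 (graph.length : Int)).foldl
    (fun total u =>
      total + (pvLoop graph graph.length
          (PySem.List.pySetD (List.replicate graph.length ((graph.length : Int) + 1)) u 0)).foldl
        (fun acc d => acc + (if d < (graph.length : Int) + 1 then d else -1)) 0) 0
  PySem.Int.floordiv total 2

-- ===== PRECONDITION & SPEC =====
-- Pre_ = exactly the inputs where A raises no IndexError: every listed neighbor is a
-- valid (possibly negative) Python index into the vertex list
def Pre_find_sum_between (graph : List (List Int)) : Prop :=
  ∀ l ∈ graph, ∀ x ∈ l, PySem.Raise.InRange graph.length x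
instance (graph : List (List Int)) : Decidable (Pre_find_sum_between graph) := by
  unfold Pre_find_sum_between; infer_instance
def pvWitness_find_sum_between : List (List Int) := [[1], [0, -2]]

def Spec_find_sum_between (graph : List (List Int)) (out : Int) : Prop :=
  out = find_sum_between_alt graph
instance (graph : List (List Int)) (out : Int) : Decidable (Spec_find_sum_between graph out) := by
  unfold Spec_find_sum_between; infer_instance

-- ===== CLAIM (what is proved, stated in full; the proofs are below) =====
def Claim_equal_find_sum_between : Prop := ∀ (graph : List (List Int)), Dom_find_sum_between graph → Pre_find_sum_between graph → Spec_find_sum_between graph (find_sum_between graph)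

-- ===== LEMMAS AND PROOFS =====

-- ---------- generic index toolkit ----------

-- read at a normalized (Nat) index, total form
def pvDget (d : List Int) (j : Nat) : Int := d.getD j 0

theorem pvIdx_lt {n : Nat} {i : Int} {j : Nat}
    (h : PySem.List.pyIdx? n i = some j) : j < n := by
  simp only [PySem.List.pyIdx?] at h
  split_ifs at h with h1 h2 h3 <;> simp_all <;> omega

theorem pvIdx_of_InRange {n : Nat} {i : Int} (h : PySem.Raise.InRange n i) :
    ∃ j, PySem.List.pyIdx? n i = some j ∧ j < n := by
  obtain ⟨h1, h2⟩ := h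
  simp only [PySem.List.pyIdx?]
  by_cases h0 : 0 ≤ i
  · exact ⟨i.toNat, by rw [if_pos h0, if_pos h2], by omega⟩
  · refine ⟨n - (-i).toNat, by rw [if_neg h0, if_pos h1], by omega⟩

theorem pvGet_elim {dist : List Int} {i y : Int}
    (h : PySem.List.pyGet? dist i = some y) :
    ∃ k, PySem.List.pyIdx? dist.length i = some k ∧ k < dist.length ∧ dist[k]? = some y := by
  simp only [PySem.List.pyGet?, Option.bind_eq_some_iff] at h
  obtain ⟨k, hk, hget⟩ := h
  exact ⟨k, hk, (List.getElem?_eq_some_iff.mp hget).1, hget⟩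

theorem pvGet_idx {dist : List Int} {i : Int} {j : Nat}
    (h : PySem.List.pyIdx? dist.length i = some j) :
    PySem.List.pyGet? dist i = some (pvDget dist j) := by
  have hj : j < dist.length := pvIdx_lt h
  simp only [PySem.List.pyGet?, h, Option.bind_some]
  rw [List.getElem?_eq_getElem hj]
  unfold pvDget
  rw [List.getD_eq_getElem _ _ hj]

theorem pvSetD_eq {dist : List Int} {i : Int} {k : Nat} (v : Int)
    (hk : PySem.List.pyIdx? dist.length i = some k) :
    PySem.List.pySetD dist i v = dist.set k v := by
  simp [PySem.List.pySetD, PySem.List.pySet?, hk]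

theorem pvSetD_dget {dist : List Int} {i : Int} {j0 : Nat} (v : Int)
    (h : PySem.List.pyIdx? dist.length i = some j0) (j : Nat) :
    pvDget (PySem.List.pySetD dist i v) j = if j = j0 then v else pvDget dist j := by
  have hj0 : j0 < dist.length := pvIdx_lt h
  rw [pvSetD_eq v h]
  unfold pvDget
  by_cases hj : j < dist.length
  · rw [List.getD_eq_getElem _ _ (by simpa using hj), List.getD_eq_getElem _ _ hj]
    rw [List.getElem_set]
    by_cases he : j = j0
    · simp [he]
    · rw [if_neg (by omega), if_neg he]
  · rw [List.getD_eq_default _ _ (by simpa using (by omega : dist.length ≤ j)),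
      List.getD_eq_default _ _ (by omega)]
    rw [if_neg (by omega)]

theorem pvMem_dget {d : List Int} {x : Int} (h : x ∈ d) :
    ∃ j, j < d.length ∧ pvDget d j = x := by
  obtain ⟨j, hj, he⟩ := List.mem_iff_getElem.mp h
  exact ⟨j, hj, by unfold pvDget; rw [List.getD_eq_getElem _ _ hj]; exact he⟩

-- lists of equal length with equal pvDget at every index are equal
theorem pvDget_ext {d e : List Int} (hlen : d.length = e.length)
    (h : ∀ j, j < d.length → pvDget d j = pvDget e j) : d = e := by
  apply List.ext_getElem hlen
  intro j h1 h2
  have := h j h1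
  unfold pvDget at this
  rwa [List.getD_eq_getElem _ _ h1, List.getD_eq_getElem _ _ h2] at this

-- ---------- level BFS (proof model shared by both directions) ----------

def pvNbrsB (lvl : Int) (nbrs : List Int) (dist : List Int) (nxt : List Int) :
    Except (List Int) (List Int × List Int) :=
  match nbrs with
  | [] => .ok (dist, nxt)
  | nb :: rest =>
    match PySem.List.pyGet? dist nb with
    | none => .error dist
    | some x =>
      if x = -1 then pvNbrsB lvl rest (PySem.List.pySetD dist nb lvl) (nxt ++ [nb])
      else pvNbrsB lvl rest dist nxt

theorem pvNbrsB_cnt (lvl : Int) (hl : lvl ≠ -1) :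
    ∀ (nbrs dist nxt d' a' : List Int),
      pvNbrsB lvl nbrs dist nxt = .ok (d', a') →
      pvCount1 d' + a'.length = pvCount1 dist + nxt.length := by
  intro nbrs
  induction nbrs with
  | nil =>
    intro dist nxt d' a' h
    simp only [pvNbrsB] at h
    injection h with h; injection h with h1 h2; subst h1; subst h2; omega
  | cons nb rest ih =>
    intro dist nxt d' a' h
    cases hg : PySem.List.pyGet? dist nb with
    | none => simp [pvNbrsB, hg] at h
    | some x =>
      simp only [pvNbrsB, hg] at h
      by_cases hx : x = -1
      · rw [if_pos hx] at h
        subst hx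
        have hc := pvCount1_pySetD dist nb lvl hg hl
        have := ih _ _ _ _ h
        simp at this; omega
      · rw [if_neg hx] at h
        exact ih _ _ _ _ h

def pvFrontB (graph : List (List Int)) (lvl : Int) (front : List Int)
    (dist : List Int) (nxt : List Int) : Except (List Int) (List Int × List Int) :=
  match front with
  | [] => .ok (dist, nxt)
  | x :: rest =>
    match PySem.List.pyGet? graph x with
    | none => .error dist
    | some nbrs =>
      match pvNbrsB lvl nbrs dist nxt with
      | .error d => .error d
      | .ok (d', nxt') => pvFrontB graph lvl rest d' nxt'

theorem pvFrontB_cnt (graph : List (List Int)) (lvl : Int) (hl : lvl ≠ -1) :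
    ∀ (front dist nxt d' a' : List Int),
      pvFrontB graph lvl front dist nxt = .ok (d', a') →
      pvCount1 d' + a'.length = pvCount1 dist + nxt.length := by
  intro front
  induction front with
  | nil =>
    intro dist nxt d' a' h
    simp only [pvFrontB] at h
    injection h with h; injection h with h1 h2; subst h1; subst h2; omega
  | cons x rest ih =>
    intro dist nxt d' a' h
    cases hg : PySem.List.pyGet? graph x with
    | none => simp [pvFrontB, hg] at h
    | some nbrs =>
      simp only [pvFrontB, hg] at h
      cases hn : pvNbrsB lvl nbrs dist nxt with
      | error d => rw [hn] at h; simp at h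
      | ok p =>
        rw [hn] at h
        obtain ⟨d1, a1⟩ := p
        have h1 := pvNbrsB_cnt lvl hl nbrs dist nxt d1 a1 hn
        have h2 := ih _ _ _ _ h
        omega

def pvLevelB (graph : List (List Int)) (dist : List Int) (front : List Int) (lvl : Int) :
    List Int :=
  if hfe : front = [] then dist
  else if h : (0:Int) ≤ lvl then
    match hf : pvFrontB graph (lvl + 1) front dist [] with
    | .error d => d
    | .ok (d', nxt) => pvLevelB graph d' nxt (lvl + 1)
  else dist
termination_by pvCount1 dist + front.length
decreasing_by
  have := pvFrontB_cnt graph (lvl + 1) (by omega) front dist [] d' nxt hf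
  have hfl : 0 < front.length := List.length_pos_of_ne_nil hfe
  simp at this; omega

-- a write into a -1 cell does not disturb any cell holding a non-(-1) value
theorem pvGet_set_ne {dist : List Int} {i w y : Int} (v : Int)
    (hi : PySem.List.pyGet? dist i = some (-1))
    (hw : PySem.List.pyGet? dist w = some y) (hy : y ≠ -1) :
    PySem.List.pyGet? (PySem.List.pySetD dist i v) w = some y := by
  obtain ⟨k, hk, hklt, hkv⟩ := pvGet_elim hi
  obtain ⟨j, hj, hjlt, hjv⟩ := pvGet_elim hw
  have hkj : k ≠ j := by
    intro he; subst he
    rw [hkv] at hjv; exact hy (Option.some.inj hjv).symm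
  rw [pvSetD_eq v hk]
  simp only [PySem.List.pyGet?, List.length_set, hj, Option.bind_eq_some_iff]
  exact ⟨j, rfl, by rw [List.getElem?_set, if_neg hkj]; exact hjv⟩

theorem pvGet_set_self {dist : List Int} {i : Int} (v : Int)
    (hi : PySem.List.pyGet? dist i = some (-1)) :
    PySem.List.pyGet? (PySem.List.pySetD dist i v) i = some v := by
  obtain ⟨k, hk, hklt, hkv⟩ := pvGet_elim hi
  rw [pvSetD_eq v hk]
  simp only [PySem.List.pyGet?, List.length_set, hk, Option.bind_eq_some_iff]
  exact ⟨k, rfl, by rw [List.getElem?_set, if_pos rfl, if_pos hklt]⟩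

-- invariants carried by the level step's inner neighbor loop
theorem pvNbrsB_ok (lvl : Int) (hl : lvl ≠ -1) :
    ∀ (nbrs dist nxt d' a' : List Int),
      pvNbrsB lvl nbrs dist nxt = .ok (d', a') →
      (∀ w ∈ nxt, PySem.List.pyGet? dist w = some lvl) →
      d'.length = dist.length ∧
      (∀ w y, PySem.List.pyGet? dist w = some y → y ≠ -1 →
        PySem.List.pyGet? d' w = some y) ∧
      (∀ w ∈ a', PySem.List.pyGet? d' w = some lvl) := by
  intro nbrs
  induction nbrs with
  | nil =>
    intro dist nxt d' a' h hnxt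
    simp only [pvNbrsB] at h
    injection h with h; injection h with h1 h2; subst h1; subst h2
    exact ⟨rfl, fun w y hw _ => hw, hnxt⟩
  | cons nb rest ih =>
    intro dist nxt d' a' h hnxt
    cases hg : PySem.List.pyGet? dist nb with
    | none => simp [pvNbrsB, hg] at h
    | some x =>
      simp only [pvNbrsB, hg] at h
      by_cases hx : x = -1
      · rw [if_pos hx] at h
        subst hx
        have hnxt1 : ∀ w ∈ nxt ++ [nb],
            PySem.List.pyGet? (PySem.List.pySetD dist nb lvl) w = some lvl := by
          intro w hw
          rcases List.mem_append.mp hw with hw | hw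
          · exact pvGet_set_ne lvl hg (hnxt w hw) hl
          · rw [List.mem_singleton.mp hw]; exact pvGet_set_self lvl hg
        obtain ⟨h1, h2, h3⟩ := ih _ _ _ _ h hnxt1
        refine ⟨h1.trans (PySem.List.length_pySetD dist nb lvl), ?_, h3⟩
        intro w y hw hy
        exact h2 w y (pvGet_set_ne lvl hg hw hy) hy
      · rw [if_neg hx] at h
        exact ih _ _ _ _ h hnxt

-- the accumulator of the inner loop only collects at the back
theorem pvNbrsB_acc (lvl : Int) :
    ∀ (nbrs dist acc1 acc2 : List Int),
      pvNbrsB lvl nbrs dist (acc1 ++ acc2) =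
        (pvNbrsB lvl nbrs dist acc2).map (fun p => (p.1, acc1 ++ p.2)) := by
  intro nbrs
  induction nbrs with
  | nil => intro dist acc1 acc2; simp [pvNbrsB, Except.map]
  | cons nb rest ih =>
    intro dist acc1 acc2
    cases hg : PySem.List.pyGet? dist nb with
    | none => simp [pvNbrsB, hg, Except.map]
    | some x =>
      simp only [pvNbrsB, hg]
      by_cases hx : x = -1
      · rw [if_pos hx, if_pos hx, List.append_assoc]
        exact ih _ _ _
      · rw [if_neg hx, if_neg hx]
        exact ih _ _ _

theorem pvNbrsB_acc' (lvl : Int) (nbrs dist acc : List Int) :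
    pvNbrsB lvl nbrs dist acc =
      (pvNbrsB lvl nbrs dist []).map (fun p => (p.1, acc ++ p.2)) := by
  have := pvNbrsB_acc lvl nbrs dist acc []
  rwa [List.append_nil] at this

-- A's inner loop is the level step's with the level value dist[v]+1
theorem pvNbrsA_eq_B (dv : Int) :
    ∀ (nbrs dist acc : List Int),
      pvNbrsA dv nbrs dist acc = pvNbrsB (dv + 1) nbrs dist acc := by
  intro nbrs
  induction nbrs with
  | nil => intro dist acc; simp [pvNbrsA, pvNbrsB]
  | cons nb rest ih =>
    intro dist acc
    cases hg : PySem.List.pyGet? dist nb with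
    | none => simp [pvNbrsA, pvNbrsB, hg]
    | some x =>
      simp only [pvNbrsA, pvNbrsB, hg]
      by_cases hx : x = -1
      · rw [if_pos hx, if_pos hx]; exact ih _ _
      · rw [if_neg hx, if_neg hx]; exact ih _ _

-- plain-match unfolding of pvBfsA (the definition's match carries an equation binder)
theorem pvBfsA_eq (graph : List (List Int)) (dist : List Int) (queue : List Int) :
    pvBfsA graph dist queue =
      match queue with
      | [] => dist
      | v :: rest =>
        match PySem.List.pyGet? graph v with
        | none => dist
        | some nbrs =>
          match PySem.List.pyGet? dist v with
          | none => dist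
          | some dv =>
            if (0:Int) ≤ dv then
              match pvNbrsA dv nbrs dist [] with
              | .error d => d
              | .ok (d', app) => pvBfsA graph d' (rest ++ app)
            else dist := by
  cases queue with
  | nil => rw [pvBfsA]
  | cons v rest =>
    rw [pvBfsA]
    cases hg : PySem.List.pyGet? graph v with
    | none => simp only [hg]
    | some nbrs =>
      simp only [hg]
      cases hd : PySem.List.pyGet? dist v with
      | none => simp only [hd]
      | some dv =>
        simp only
        by_cases h : (0:Int) ≤ dv
        · rw [dif_pos h, if_pos h]
          split <;> rename_i heq <;> simp [heq]
        · rw [dif_neg h, if_neg h]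

-- plain-match unfolding of pvLevelB
theorem pvLevelB_eq (graph : List (List Int)) (dist front : List Int) (lvl : Int) :
    pvLevelB graph dist front lvl =
      if front = [] then dist
      else if (0:Int) ≤ lvl then
        match pvFrontB graph (lvl + 1) front dist [] with
        | .error d => d
        | .ok (d', nxt) => pvLevelB graph d' nxt (lvl + 1)
      else dist := by
  rw [pvLevelB]
  by_cases h1 : front = []
  · rw [dif_pos h1, if_pos h1]
  · rw [dif_neg h1, if_neg h1]
    by_cases h2 : (0:Int) ≤ lvl
    · rw [dif_pos h2, if_pos h2]
      split <;> rename_i heq <;> simp [heq]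
    · rw [dif_neg h2, if_neg h2]

-- BRIDGE A: the deque BFS from queue = cur ++ next equals finishing the current level
theorem pvBridge (graph : List (List Int)) :
    ∀ (m : Nat) (dist cur next : List Int) (lvl : Int),
      2 * (pvCount1 dist + cur.length + next.length) + (if cur = [] then 1 else 0) ≤ m →
      dist.length = graph.length → (0:Int) ≤ lvl →
      (∀ v ∈ cur, PySem.List.pyGet? dist v = some lvl) →
      (∀ v ∈ next, PySem.List.pyGet? dist v = some (lvl + 1)) →
      pvBfsA graph dist (cur ++ next) =
        (match pvFrontB graph (lvl + 1) cur dist next with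
         | .error d => d
         | .ok (d', nxt) => pvLevelB graph d' nxt (lvl + 1)) := by
  intro m
  induction m with
  | zero =>
    intro dist cur next lvl hm _ _ _ _
    cases cur <;> simp at hm
  | succ m ih =>
    intro dist cur next lvl hm hlen hlvl hc hn
    cases cur with
    | nil =>
      simp only [pvFrontB, List.nil_append]
      cases next with
      | nil => rw [pvBfsA_eq, pvLevelB_eq]; simp
      | cons w next' =>
        rw [pvLevelB_eq]
        rw [if_neg (by simp : ¬(w :: next' = []))]
        rw [if_pos (by omega : (0:Int) ≤ lvl + 1)]
        have := ih dist (w :: next') [] (lvl + 1) (by simp at hm ⊢; omega) hlen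
          (by omega) hn (by simp)
        simpa using this
    | cons v cur' =>
      have hv : PySem.List.pyGet? dist v = some lvl := hc v (by simp)
      have hgv : ∃ nbrs, PySem.List.pyGet? graph v = some nbrs := by
        cases hg : PySem.List.pyGet? graph v with
        | some nbrs => exact ⟨_, rfl⟩
        | none =>
          exfalso
          rw [PySem.List.pyGet?_eq_none_iff] at hg
          apply hg
          rw [← hlen]
          by_contra hr
          rw [← PySem.List.pyGet?_eq_none_iff] at hr
          rw [hv] at hr; simp at hr
      obtain ⟨nbrs, hgv⟩ := hgv
      rw [List.cons_append, pvBfsA_eq]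
      simp only [hgv, hv]
      rw [if_pos hlvl]
      simp only [pvFrontB, hgv]
      have hAB : pvNbrsA lvl nbrs dist [] = pvNbrsB (lvl + 1) nbrs dist [] :=
        pvNbrsA_eq_B lvl nbrs dist []
      have hacc := pvNbrsB_acc' (lvl + 1) nbrs dist next
      cases h0 : pvNbrsB (lvl + 1) nbrs dist [] with
      | error d =>
        rw [h0] at hacc
        simp only [hAB, h0, hacc, Except.map]
      | ok p =>
        obtain ⟨d', app⟩ := p
        rw [h0] at hacc
        simp only [hAB, h0, hacc, Except.map]
        obtain ⟨hlen', hpres, hnew⟩ :=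
          pvNbrsB_ok (lvl + 1) (by omega) nbrs dist [] d' app h0 (by simp)
        have hcount := pvNbrsB_cnt (lvl + 1) (by omega) nbrs dist [] d' app h0
        rw [List.append_assoc]
        refine ih d' cur' (next ++ app) lvl ?_ (hlen'.trans hlen) hlvl ?_ ?_
        · have hflag : (if cur' = [] then 1 else 0) ≤ 1 := by split <;> omega
          simp only [List.length_cons, List.length_append] at hm ⊢
          simp only [List.length_nil] at hcount
          omega
        · intro w hw
          exact hpres w lvl (hc w (by simp [hw])) (by omega)
        · intro w hw
          rcases List.mem_append.mp hw with hw | hw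
          · exact hpres w (lvl + 1) (hn w hw) (by omega)
          · exact hnew w hw

-- per-vertex: deque BFS = level BFS
theorem pvBfs_eq (graph : List (List Int)) (u : Int) (hu0 : (0:Int) ≤ u)
    (hun : u < (graph.length : Int)) :
    pvBfsA graph (PySem.List.pySetD (List.replicate graph.length (-1)) u 0) [u] =
      pvLevelB graph (PySem.List.pySetD (List.replicate graph.length (-1)) u 0) [u] 0 := by
  set dist0 := PySem.List.pySetD (List.replicate graph.length (-1)) u 0 with hd0
  have hlen : dist0.length = graph.length := by
    rw [hd0, PySem.List.length_pySetD, List.length_replicate]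
  have hget : PySem.List.pyGet? dist0 u = some 0 := by
    have hr : PySem.List.pyGet? (List.replicate graph.length (-1 : Int)) u = some (-1) := by
      rw [PySem.List.pyGet?_of_nonneg _ hu0]
      rw [List.getElem?_eq_getElem (by rw [List.length_replicate]; omega)]
      simp
    exact pvGet_set_self 0 hr
  have hb := pvBridge graph (2 * (pvCount1 dist0 + 1)) dist0 [u] [] 0
    (by simp) hlen (by omega)
    (by intro w hw; rw [List.mem_singleton.mp hw]; exact hget) (by simp)
  rw [List.append_nil] at hb
  rw [hb, pvLevelB_eq]
  simp

-- ---------- BRIDGE B: Bellman-Ford rounds = level BFS ----------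

-- edge between normalized vertex indices
def pvEdge (graph : List (List Int)) (v j : Nat) : Prop :=
  ∃ x ∈ graph.getD v [], PySem.List.pyIdx? graph.length x = some j

-- some frontier member's out-edge reaches j
def pvHit (graph : List (List Int)) (F : List Int) (j : Nat) : Prop :=
  ∃ y ∈ F, ∃ jv, PySem.List.pyIdx? graph.length y = some jv ∧ pvEdge graph jv j

-- -1 ↦ INF = n+1 view of a level-BFS distance array
def pvMapInf (n : Nat) (d : List Int) : List Int :=
  d.map (fun x => if x = -1 then (n : Int) + 1 else x)

theorem pvMapInf_length (n : Nat) (d : List Int) : (pvMapInf n d).length = d.length := by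
  simp [pvMapInf]

theorem pvDget_mapInf (n : Nat) (d : List Int) (j : Nat) (hj : j < d.length) :
    pvDget (pvMapInf n d) j = if pvDget d j = -1 then (n : Int) + 1 else pvDget d j := by
  unfold pvDget pvMapInf
  rw [List.getD_eq_getElem _ _ (by simpa using hj), List.getD_eq_getElem _ _ hj]
  simp

-- pointwise characterization of the inner neighbor loop of a level step
theorem pvNbrsB_char (graph : List (List Int)) (lvl : Int) (hl0 : 0 < lvl) :
    ∀ (nbrs dist acc : List Int),
      dist.length = graph.length →
      (∀ x ∈ nbrs, PySem.Raise.InRange graph.length x) →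
      ∃ d' a', pvNbrsB lvl nbrs dist acc = .ok (d', a') ∧
        d'.length = dist.length ∧
        (∀ j, j < graph.length →
          ((pvDget dist j = -1 ∧ (∃ x ∈ nbrs, PySem.List.pyIdx? graph.length x = some j)
              → pvDget d' j = lvl) ∧
           (¬ (pvDget dist j = -1 ∧ (∃ x ∈ nbrs, PySem.List.pyIdx? graph.length x = some j))
              → pvDget d' j = pvDget dist j))) ∧
        (∀ y ∈ a', y ∈ acc ∨ y ∈ nbrs) ∧
        (∀ j, j < graph.length →
          ((∃ y ∈ a', PySem.List.pyIdx? graph.length y = some j) ↔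
            (∃ y ∈ acc, PySem.List.pyIdx? graph.length y = some j) ∨
            (pvDget dist j = -1 ∧ ∃ x ∈ nbrs, PySem.List.pyIdx? graph.length x = some j))) := by
  intro nbrs
  induction nbrs with
  | nil =>
    intro dist acc hlen hin
    refine ⟨dist, acc, by simp [pvNbrsB], rfl, ?_, fun y hy => Or.inl hy, ?_⟩
    · intro j hj
      exact ⟨fun h => absurd h.2 (by simp), fun _ => rfl⟩
    · intro j hj
      simp
  | cons nb rest ih =>
    intro dist acc hlen hin
    obtain ⟨j0, hj0, hj0lt⟩ := pvIdx_of_InRange (hin nb (List.mem_cons_self))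
    have hj0' : PySem.List.pyIdx? dist.length nb = some j0 := by rw [hlen]; exact hj0
    have hget := pvGet_idx hj0'
    have hrest : ∀ x ∈ rest, PySem.Raise.InRange graph.length x :=
      fun x hx => hin x (List.mem_cons_of_mem _ hx)
    by_cases hx : pvDget dist j0 = -1
    · -- write branch
      have hlen₁ : (PySem.List.pySetD dist nb lvl).length = graph.length := by
        rw [PySem.List.length_pySetD]; exact hlen
      have hdg₁ := pvSetD_dget lvl hj0'
      obtain ⟨d', a', hrec, hlen', hpt, hmem, hiff⟩ := ih (PySem.List.pySetD dist nb lvl)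
        (acc ++ [nb]) hlen₁ hrest
      refine ⟨d', a', ?_, by rw [hlen', hlen₁, hlen], ?_, ?_, ?_⟩
      · simp only [pvNbrsB, hget]
        rw [if_pos hx]
        exact hrec
      · intro j hj
        by_cases hjj : j = j0
        · subst hjj
          have hC1 : ¬ (pvDget (PySem.List.pySetD dist nb lvl) j = -1 ∧
              ∃ x ∈ rest, PySem.List.pyIdx? graph.length x = some j) := by
            rw [hdg₁ j, if_pos rfl]
            intro h
            omega
          have hval : pvDget d' j = lvl := by
            rw [(hpt j hj).2 hC1, hdg₁ j, if_pos rfl]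
          exact ⟨fun _ => hval, fun hnc => absurd ⟨hx, nb, List.mem_cons_self, hj0⟩ hnc⟩
        · have hd1 : pvDget (PySem.List.pySetD dist nb lvl) j = pvDget dist j := by
            rw [hdg₁ j, if_neg hjj]
          constructor
          · rintro ⟨h1, x, hxm, hxi⟩
            rcases List.mem_cons.mp hxm with hxe | hxr
            · subst hxe; rw [hj0] at hxi; exact absurd (Option.some.inj hxi).symm hjj
            · exact (hpt j hj).1 ⟨by rw [hd1]; exact h1, x, hxr, hxi⟩
          · intro hnc
            have hnc1 : ¬ (pvDget (PySem.List.pySetD dist nb lvl) j = -1 ∧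
                ∃ x ∈ rest, PySem.List.pyIdx? graph.length x = some j) := by
              rw [hd1]
              rintro ⟨h1, x, hxr, hxi⟩
              exact hnc ⟨h1, x, List.mem_cons_of_mem _ hxr, hxi⟩
            rw [(hpt j hj).2 hnc1, hd1]
      · intro y hy
        rcases hmem y hy with hya | hyr
        · rcases List.mem_append.mp hya with h | h
          · exact Or.inl h
          · exact Or.inr (by rw [List.mem_singleton.mp h]; exact List.mem_cons_self)
        · exact Or.inr (List.mem_cons_of_mem _ hyr)
      · intro j hj
        rw [hiff j hj]
        by_cases hjj : j = j0
        · subst hjj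
          refine iff_of_true (Or.inl ⟨nb, List.mem_append.mpr (Or.inr (List.mem_singleton_self nb)), hj0⟩)
            (Or.inr ⟨hx, nb, List.mem_cons_self, hj0⟩)
        · have hd1 : pvDget (PySem.List.pySetD dist nb lvl) j = pvDget dist j := by
            rw [hdg₁ j, if_neg hjj]
          constructor
          · rintro (⟨y, hym, hyi⟩ | ⟨h1, x, hxr, hxi⟩)
            · rcases List.mem_append.mp hym with h | h
              · exact Or.inl ⟨y, h, hyi⟩
              · rw [List.mem_singleton.mp h] at hyi
                rw [hj0] at hyi
                exact absurd (Option.some.inj hyi).symm hjj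
            · exact Or.inr ⟨by rw [hd1] at h1; exact h1, x, List.mem_cons_of_mem _ hxr, hxi⟩
          · rintro (⟨y, hym, hyi⟩ | ⟨h1, x, hxm, hxi⟩)
            · exact Or.inl ⟨y, List.mem_append.mpr (Or.inl hym), hyi⟩
            · rcases List.mem_cons.mp hxm with hxe | hxr
              · subst hxe; rw [hj0] at hxi; exact absurd (Option.some.inj hxi).symm hjj
              · exact Or.inr ⟨by rw [hd1]; exact h1, x, hxr, hxi⟩
    · -- skip branch
      obtain ⟨d', a', hrec, hlen', hpt, hmem, hiff⟩ := ih dist acc hlen hrest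
      refine ⟨d', a', ?_, hlen', ?_,
        fun y hy => (hmem y hy).imp id (List.mem_cons_of_mem _), ?_⟩
      · simp only [pvNbrsB, hget]
        rw [if_neg hx]
        exact hrec
      · intro j hj
        by_cases hjj : j = j0
        · have hxj : ¬ pvDget dist j = -1 := by rw [hjj]; exact hx
          exact ⟨fun h => absurd h.1 hxj, fun _ => (hpt j hj).2 (fun h => hxj h.1)⟩
        · constructor
          · rintro ⟨h1, x, hxm, hxi⟩
            rcases List.mem_cons.mp hxm with hxe | hxr
            · subst hxe; rw [hj0] at hxi; exact absurd (Option.some.inj hxi).symm hjj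
            · exact (hpt j hj).1 ⟨h1, x, hxr, hxi⟩
          · intro hnc
            refine (hpt j hj).2 ?_
            rintro ⟨h1, x, hxr, hxi⟩
            exact hnc ⟨h1, x, List.mem_cons_of_mem _ hxr, hxi⟩
      · intro j hj
        rw [hiff j hj]
        by_cases hjj : j = j0
        · have hxj : ¬ pvDget dist j = -1 := by rw [hjj]; exact hx
          constructor
          · rintro (h | ⟨h1, _⟩)
            · exact Or.inl h
            · exact absurd h1 hxj
          · rintro (h | ⟨h1, _⟩)
            · exact Or.inl h
            · exact absurd h1 hxj
        · constructor
          · rintro (h | ⟨h1, x, hxr, hxi⟩)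
            · exact Or.inl h
            · exact Or.inr ⟨h1, x, List.mem_cons_of_mem _ hxr, hxi⟩
          · rintro (h | ⟨h1, x, hxm, hxi⟩)
            · exact Or.inl h
            · rcases List.mem_cons.mp hxm with hxe | hxr
              · subst hxe; rw [hj0] at hxi; exact absurd (Option.some.inj hxi).symm hjj
              · exact Or.inr ⟨h1, x, hxr, hxi⟩

-- the accumulator of a whole level step only collects at the back
theorem pvFrontB_acc (graph : List (List Int)) (lvl : Int) :
    ∀ (F dist acc1 acc2 : List Int),
      pvFrontB graph lvl F dist (acc1 ++ acc2) =
        (pvFrontB graph lvl F dist acc2).map (fun p => (p.1, acc1 ++ p.2)) := by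
  intro F
  induction F with
  | nil => intro dist acc1 acc2; simp [pvFrontB, Except.map]
  | cons x rest ih =>
    intro dist acc1 acc2
    cases hg : PySem.List.pyGet? graph x with
    | none => simp [pvFrontB, hg, Except.map]
    | some nbrs =>
      simp only [pvFrontB, hg]
      rw [pvNbrsB_acc lvl nbrs dist acc1 acc2]
      cases h0 : pvNbrsB lvl nbrs dist acc2 with
      | error d => simp [Except.map]
      | ok p =>
        obtain ⟨d1, a1⟩ := p
        simp only [Except.map]
        exact ih d1 acc1 a1

-- pointwise characterization of one whole level step
theorem pvFrontB_char (graph : List (List Int)) (hPre : Pre_find_sum_between graph)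
    (lvl : Int) (hl0 : 0 < lvl) :
    ∀ (F dist : List Int),
      dist.length = graph.length →
      (∀ v ∈ F, PySem.Raise.InRange graph.length v) →
      ∃ d' nxt, pvFrontB graph lvl F dist [] = .ok (d', nxt) ∧
        d'.length = dist.length ∧
        (∀ j, j < graph.length →
          ((pvDget dist j = -1 ∧ pvHit graph F j → pvDget d' j = lvl) ∧
           (¬ (pvDget dist j = -1 ∧ pvHit graph F j) → pvDget d' j = pvDget dist j))) ∧
        (∀ y ∈ nxt, PySem.Raise.InRange graph.length y) ∧
        (∀ j, j < graph.length →
          ((∃ y ∈ nxt, PySem.List.pyIdx? graph.length y = some j) ↔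
            (pvDget dist j = -1 ∧ pvHit graph F j))) := by
  intro F
  induction F with
  | nil =>
    intro dist hlen _
    refine ⟨dist, [], by simp [pvFrontB], rfl, ?_, by simp, ?_⟩
    · intro j hj
      exact ⟨fun h => absurd h.2 (by simp [pvHit]), fun _ => rfl⟩
    · intro j hj
      simp [pvHit]
  | cons x restF ih =>
    intro dist hlen hFr
    obtain ⟨jv, hjv, hjvlt⟩ := pvIdx_of_InRange (hFr x List.mem_cons_self)
    have hgx : PySem.List.pyGet? graph x = some graph[jv] := by
      simp only [PySem.List.pyGet?, hjv, Option.bind_some]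
      rw [List.getElem?_eq_getElem hjvlt]
    have hnbr_in : ∀ z ∈ graph[jv], PySem.Raise.InRange graph.length z :=
      fun z hz => hPre graph[jv] (List.getElem_mem hjvlt) z hz
    obtain ⟨d1, a1, hrec1, hlen1, hpt1, hmem1, hiff1⟩ :=
      pvNbrsB_char graph lvl hl0 graph[jv] dist [] hlen hnbr_in
    obtain ⟨d', nxt2, hrec2, hlen2, hpt2, hmem2, hiff2⟩ :=
      ih d1 (hlen1.trans hlen) (fun v hv => hFr v (List.mem_cons_of_mem _ hv))
    -- the per-x edge condition
    have hEdge : ∀ j, ((∃ z ∈ graph[jv], PySem.List.pyIdx? graph.length z = some j) ↔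
        ∃ jv', PySem.List.pyIdx? graph.length x = some jv' ∧ pvEdge graph jv' j) := by
      intro j
      constructor
      · rintro ⟨z, hz, hzi⟩
        exact ⟨jv, hjv, z, by rw [List.getD_eq_getElem _ _ hjvlt]; exact hz, hzi⟩
      · rintro ⟨jv', hjv', z, hz, hzi⟩
        rw [hjv] at hjv'
        rw [← Option.some.inj hjv'] at hz
        rw [List.getD_eq_getElem _ _ hjvlt] at hz
        exact ⟨z, hz, hzi⟩
    have hHit : ∀ j, (pvHit graph (x :: restF) j ↔
        (∃ z ∈ graph[jv], PySem.List.pyIdx? graph.length z = some j) ∨ pvHit graph restF j) := by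
      intro j
      rw [hEdge j]
      constructor
      · rintro ⟨y, hym, hy⟩
        rcases List.mem_cons.mp hym with hye | hyr
        · exact Or.inl (by rw [hye] at hy; exact hy)
        · exact Or.inr ⟨y, hyr, hy⟩
      · rintro (h | ⟨y, hyr, hy⟩)
        · exact ⟨x, List.mem_cons_self, h⟩
        · exact ⟨y, List.mem_cons_of_mem _ hyr, hy⟩
    have hd1 : ∀ j, j < graph.length → pvDget d1 j =
        if pvDget dist j = -1 ∧ (∃ z ∈ graph[jv], PySem.List.pyIdx? graph.length z = some j)
        then lvl else pvDget dist j := by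
      intro j hj
      by_cases hc : pvDget dist j = -1 ∧
          (∃ z ∈ graph[jv], PySem.List.pyIdx? graph.length z = some j)
      · rw [if_pos hc]; exact (hpt1 j hj).1 hc
      · rw [if_neg hc]; exact (hpt1 j hj).2 hc
    refine ⟨d', a1 ++ nxt2, ?_, hlen2.trans (hlen1.trans rfl), ?_, ?_, ?_⟩
    · simp only [pvFrontB, hgx, hrec1]
      have hacc := pvFrontB_acc graph lvl restF d1 a1 []
      rw [List.append_nil] at hacc
      rw [hacc, hrec2]
      simp [Except.map]
    · intro j hj
      constructor
      · rintro ⟨hm1, hhit⟩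
        rcases (hHit j).mp hhit with hE | hR
        · have : pvDget d1 j = lvl := by rw [hd1 j hj, if_pos ⟨hm1, hE⟩]
          have hnc2 : ¬ (pvDget d1 j = -1 ∧ pvHit graph restF j) := by
            rw [this]; intro hcc; omega
          rw [(hpt2 j hj).2 hnc2, this]
        · by_cases hE : ∃ z ∈ graph[jv], PySem.List.pyIdx? graph.length z = some j
          · have : pvDget d1 j = lvl := by rw [hd1 j hj, if_pos ⟨hm1, hE⟩]
            have hnc2 : ¬ (pvDget d1 j = -1 ∧ pvHit graph restF j) := by
              rw [this]; intro hcc; omega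
            rw [(hpt2 j hj).2 hnc2, this]
          · have hd1j : pvDget d1 j = pvDget dist j := by
              rw [hd1 j hj, if_neg (fun hcc => hE hcc.2)]
            exact (hpt2 j hj).1 ⟨by rw [hd1j]; exact hm1, hR⟩
      · intro hnc
        have hnE : ¬ (pvDget dist j = -1 ∧
            ∃ z ∈ graph[jv], PySem.List.pyIdx? graph.length z = some j) := by
          rintro ⟨h1, hE⟩
          exact hnc ⟨h1, (hHit j).mpr (Or.inl hE)⟩
        have hd1j : pvDget d1 j = pvDget dist j := by rw [hd1 j hj, if_neg hnE]
        have hnc2 : ¬ (pvDget d1 j = -1 ∧ pvHit graph restF j) := by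
          rw [hd1j]
          rintro ⟨h1, hR⟩
          exact hnc ⟨h1, (hHit j).mpr (Or.inr hR)⟩
        rw [(hpt2 j hj).2 hnc2, hd1j]
    · intro y hy
      rcases List.mem_append.mp hy with h | h
      · rcases hmem1 y h with h' | h'
        · simp at h'
        · exact hnbr_in y h'
      · exact hmem2 y h
    · intro j hj
      have hiff1' := hiff1 j hj
      simp only [List.not_mem_nil, false_and, exists_false, false_or] at hiff1'
      constructor
      · rintro ⟨y, hym, hyi⟩
        rcases List.mem_append.mp hym with h | h
        · have := hiff1'.mp ⟨y, h, hyi⟩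
          exact ⟨this.1, (hHit j).mpr (Or.inl this.2)⟩
        · have := (hiff2 j hj).mp ⟨y, h, hyi⟩
          have hd1j := hd1 j hj
          by_cases hE : pvDget dist j = -1 ∧
              ∃ z ∈ graph[jv], PySem.List.pyIdx? graph.length z = some j
          · rw [if_pos hE] at hd1j
            rw [hd1j] at this
            omega
          · rw [if_neg hE] at hd1j
            rw [hd1j] at this
            exact ⟨this.1, (hHit j).mpr (Or.inr this.2)⟩
      · rintro ⟨h1, hhit⟩
        rcases (hHit j).mp hhit with hE | hR
        · obtain ⟨y, hym, hyi⟩ := hiff1'.mpr ⟨h1, hE⟩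
          exact ⟨y, List.mem_append.mpr (Or.inl hym), hyi⟩
        · by_cases hE : ∃ z ∈ graph[jv], PySem.List.pyIdx? graph.length z = some j
          · obtain ⟨y, hym, hyi⟩ := hiff1'.mpr ⟨h1, hE⟩
            exact ⟨y, List.mem_append.mpr (Or.inl hym), hyi⟩
          · have hd1j : pvDget d1 j = pvDget dist j := by
              rw [hd1 j hj, if_neg (fun hcc => hE hcc.2)]
            obtain ⟨y, hym, hyi⟩ := (hiff2 j hj).mpr ⟨by rw [hd1j]; exact h1, hR⟩
            exact ⟨y, List.mem_append.mpr (Or.inr hym), hyi⟩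

-- shape of the working array during one Bellman-Ford round: S = sources already scanned
def pvShape (graph : List (List Int)) (dA : List Int) (lvl : Int) (S : Nat → Prop)
    (new : List Int) : Prop :=
  new.length = graph.length ∧
  ∀ j, j < graph.length →
    (pvDget dA j ≠ -1 → pvDget new j = pvDget dA j) ∧
    (pvDget dA j = -1 →
      (S j → pvDget new j = lvl + 1) ∧ (¬ S j → pvDget new j = (graph.length : Int) + 1))

theorem pvShape_congr (graph : List (List Int)) (dA : List Int) (lvl : Int)
    {S T : Nat → Prop} (h : ∀ j, j < graph.length → pvDget dA j = -1 → (S j ↔ T j))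
    {new : List Int} (hs : pvShape graph dA lvl S new) : pvShape graph dA lvl T new := by
  obtain ⟨h1, h2⟩ := hs
  refine ⟨h1, fun j hj => ⟨(h2 j hj).1, fun hm => ?_⟩⟩
  obtain ⟨ha, hb⟩ := (h2 j hj).2 hm
  exact ⟨fun ht => ha ((h j hj hm).mpr ht), fun ht => hb (fun hs' => ht ((h j hj hm).mp hs'))⟩

theorem pvIdx_nat {n v : Nat} (h : v < n) : PySem.List.pyIdx? n (v : Int) = some v := by
  simp only [PySem.List.pyIdx?]
  rw [if_pos (by omega), if_pos (by exact_mod_cast h)]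
  simp

-- the round's step at a Nat-typed loop index
def pvStepNat (graph : List (List Int)) (dB : List Int) (new : List Int) (v : Nat) : List Int :=
  pvRoundStep graph dB new (v : Int)

-- a relaxation pass that never fires leaves the array unchanged
theorem pvRelax_noop (dv1 : Int) :
    ∀ (nbrs new : List Int),
      (∀ nb ∈ nbrs, ∀ x, PySem.List.pyGet? new nb = some x → ¬ dv1 < x) →
      pvRelax dv1 nbrs new = new := by
  intro nbrs
  induction nbrs with
  | nil => intro new _; simp [pvRelax]
  | cons nb rest ih =>
    intro new h
    have hstep : (match PySem.List.pyGet? new nb with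
        | none => new
        | some x => if dv1 < x then PySem.List.pySetD new nb dv1 else new) = new := by
      cases hg : PySem.List.pyGet? new nb with
      | none => rfl
      | some x => simp only; rw [if_neg (h nb List.mem_cons_self x hg)]
    simp only [pvRelax, List.foldl_cons] at *
    rw [hstep]
    exact ih new (fun nb' h' x hx => h nb' (List.mem_cons_of_mem _ h') x hx)

-- every cell of a shaped working array is at most INF = n+1
theorem pvShape_le (graph : List (List Int)) (dA : List Int) (lvl : Int)
    {S : Nat → Prop} {new : List Int} (hs : pvShape graph dA lvl S new)
    (hlvln : lvl ≤ (graph.length : Int))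
    (hI1 : ∀ j, j < graph.length →
      pvDget dA j = -1 ∨ (0 ≤ pvDget dA j ∧ pvDget dA j ≤ lvl)) :
    ∀ j, j < graph.length → pvDget new j ≤ (graph.length : Int) + 1 := by
  intro j hj
  obtain ⟨_, h2⟩ := hs
  by_cases hm : pvDget dA j = -1
  · by_cases hS : S j
    · rw [((h2 j hj).2 hm).1 hS]; omega
    · rw [((h2 j hj).2 hm).2 hS]
  · rw [(h2 j hj).1 hm]
    rcases hI1 j hj with h | h
    · exact absurd h hm
    · omega

-- relaxing the out-edges of a vertex sitting exactly at the current level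
theorem pvRelax_write (graph : List (List Int)) (dA : List Int) (lvl : Int)
    (hI1 : ∀ j, j < graph.length →
      pvDget dA j = -1 ∨ (0 ≤ pvDget dA j ∧ pvDget dA j ≤ lvl))
    (hlt : lvl + 1 ≤ (graph.length : Int)) :
    ∀ (nbrs : List Int) (new : List Int) (S : Nat → Prop),
      (∀ nb ∈ nbrs, PySem.Raise.InRange graph.length nb) →
      pvShape graph dA lvl S new →
      pvShape graph dA lvl
        (fun j => S j ∨ ∃ x ∈ nbrs, PySem.List.pyIdx? graph.length x = some j)
        (pvRelax (lvl + 1) nbrs new) := by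
  intro nbrs
  induction nbrs with
  | nil =>
    intro new S _ hs
    refine pvShape_congr graph dA lvl (fun j hj _ => ?_) hs
    simp
  | cons nb rest ih =>
    intro new S hin hs
    obtain ⟨j0, hj0, hj0lt⟩ := pvIdx_of_InRange (hin nb List.mem_cons_self)
    have hj0' : PySem.List.pyIdx? new.length nb = some j0 := by rw [hs.1]; exact hj0
    have hget := pvGet_idx hj0'
    have hrest : ∀ nb' ∈ rest, PySem.Raise.InRange graph.length nb' :=
      fun nb' h' => hin nb' (List.mem_cons_of_mem _ h')
    have hsplit : ∀ j, ((∃ x ∈ nb :: rest, PySem.List.pyIdx? graph.length x = some j) ↔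
        j = j0 ∨ ∃ x ∈ rest, PySem.List.pyIdx? graph.length x = some j) := by
      intro j
      constructor
      · rintro ⟨x, hxm, hxi⟩
        rcases List.mem_cons.mp hxm with hxe | hxr
        · subst hxe; rw [hj0] at hxi; exact Or.inl (Option.some.inj hxi).symm
        · exact Or.inr ⟨x, hxr, hxi⟩
      · rintro (rfl | ⟨x, hxr, hxi⟩)
        · exact ⟨nb, List.mem_cons_self, hj0⟩
        · exact ⟨x, List.mem_cons_of_mem _ hxr, hxi⟩
    by_cases hm : pvDget dA j0 = -1
    · by_cases hS : S j0
      · -- already written this round: no update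
        have hval : pvDget new j0 = lvl + 1 := ((hs.2 j0 hj0lt).2 hm).1 hS
        have hnoop : pvRelax (lvl + 1) (nb :: rest) new = pvRelax (lvl + 1) rest new := by
          simp only [pvRelax, List.foldl_cons, hget, hval]
          rw [if_neg (by omega)]
        rw [hnoop]
        refine pvShape_congr graph dA lvl (fun j hj hj1 => ?_) (ih new S hrest hs)
        rw [hsplit j]
        constructor
        · rintro (h | h)
          · exact Or.inl h
          · exact Or.inr (Or.inr h)
        · rintro (h | rfl | h)
          · exact Or.inl h
          · exact Or.inl hS
          · exact Or.inr h
      · -- still INF: the relaxation fires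
        have hval : pvDget new j0 = (graph.length : Int) + 1 := ((hs.2 j0 hj0lt).2 hm).2 hS
        have hfire : pvRelax (lvl + 1) (nb :: rest) new =
            pvRelax (lvl + 1) rest (PySem.List.pySetD new nb (lvl + 1)) := by
          simp only [pvRelax, List.foldl_cons, hget, hval]
          rw [if_pos (by omega)]
        rw [hfire]
        have hshape1 : pvShape graph dA lvl (fun j => S j ∨ j = j0)
            (PySem.List.pySetD new nb (lvl + 1)) := by
          refine ⟨by rw [PySem.List.length_pySetD]; exact hs.1, fun j hj => ?_⟩
          have hdg := pvSetD_dget (lvl + 1) hj0' j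
          constructor
          · intro hne
            have hjj : j ≠ j0 := fun he => hne (he ▸ hm)
            rw [hdg, if_neg hjj]
            exact (hs.2 j hj).1 hne
          · intro hme
            constructor
            · rintro (h | rfl)
              · by_cases hjj : j = j0
                · rw [hdg, if_pos hjj]
                · rw [hdg, if_neg hjj]; exact ((hs.2 j hj).2 hme).1 h
              · rw [hdg, if_pos rfl]
            · intro hns
              have hjj : j ≠ j0 := fun he => hns (Or.inr he)
              rw [hdg, if_neg hjj]
              exact ((hs.2 j hj).2 hme).2 (fun h => hns (Or.inl h))
        refine pvShape_congr graph dA lvl (fun j hj hj1 => ?_)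
          (ih (PySem.List.pySetD new nb (lvl + 1)) _ hrest hshape1)
        rw [hsplit j]
        constructor
        · rintro ((h | h) | h)
          · exact Or.inl h
          · exact Or.inr (Or.inl h)
          · exact Or.inr (Or.inr h)
        · rintro (h | h | h)
          · exact Or.inl (Or.inl h)
          · exact Or.inl (Or.inr h)
          · exact Or.inr h
    · -- target already has a finite BFS value ≤ lvl: no update
      have hval : pvDget new j0 = pvDget dA j0 := (hs.2 j0 hj0lt).1 hm
      have hle : pvDget dA j0 ≤ lvl := by
        rcases hI1 j0 hj0lt with h | h
        · exact absurd h hm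
        · exact h.2
      have hnoop2 : pvRelax (lvl + 1) (nb :: rest) new = pvRelax (lvl + 1) rest new := by
        simp only [pvRelax, List.foldl_cons, hget, hval]
        rw [if_neg (by omega)]
      rw [hnoop2]
      refine pvShape_congr graph dA lvl (fun j hj hj1 => ?_) (ih new S hrest hs)
      rw [hsplit j]
      constructor
      · rintro (h | h)
        · exact Or.inl h
        · exact Or.inr (Or.inr h)
      · rintro (h | rfl | h)
        · exact Or.inl h
        · exact absurd hj1 hm
        · exact Or.inr h

-- scanning a set of source vertices in one round
theorem pvRound_scan (graph : List (List Int)) (hPre : Pre_find_sum_between graph)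
    (dA : List Int) (lvl : Int)
    (hlen : dA.length = graph.length)
    (h0 : (0:Int) ≤ lvl)
    (hlvln : lvl ≤ (graph.length : Int))
    (hok : (∃ v, v < graph.length ∧ pvDget dA v = lvl) → lvl + 1 ≤ (graph.length : Int))
    (hI1 : ∀ j, j < graph.length →
      pvDget dA j = -1 ∨ (0 ≤ pvDget dA j ∧ pvDget dA j ≤ lvl))
    (hI3 : ∀ v j, v < graph.length → j < graph.length → pvEdge graph v j →
      0 ≤ pvDget dA v → pvDget dA v < lvl →
      pvDget dA j ≠ -1 ∧ pvDget dA j ≤ pvDget dA v + 1) :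
    ∀ (vs : List Nat) (new : List Int) (S : Nat → Prop),
      (∀ v ∈ vs, v < graph.length) →
      pvShape graph dA lvl S new →
      pvShape graph dA lvl
        (fun j => S j ∨ ∃ v ∈ vs, pvDget dA v = lvl ∧ pvEdge graph v j)
        (vs.foldl (pvStepNat graph (pvMapInf graph.length dA)) new) := by
  intro vs
  induction vs with
  | nil =>
    intro new S _ hs
    refine pvShape_congr graph dA lvl (fun j hj _ => ?_) hs
    simp
  | cons v rest ih =>
    intro new S hvs hs
    have hv : v < graph.length := hvs v List.mem_cons_self
    have hrest : ∀ v' ∈ rest, v' < graph.length := fun v' h' => hvs v' (List.mem_cons_of_mem _ h')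
    have hB : PySem.List.pyIdx? (pvMapInf graph.length dA).length (v : Int) = some v := by
      rw [pvMapInf_length, hlen]; exact pvIdx_nat hv
    have hgetB := pvGet_idx hB
    have hdgB : pvDget (pvMapInf graph.length dA) v =
        if pvDget dA v = -1 then (graph.length : Int) + 1 else pvDget dA v :=
      pvDget_mapInf graph.length dA v (by omega)
    have hgetG : PySem.List.pyGet? graph (v : Int) = some graph[v] := by
      simp only [PySem.List.pyGet?, pvIdx_nat hv, Option.bind_some]
      rw [List.getElem?_eq_getElem hv]
    have hnbr_in : ∀ z ∈ graph[v], PySem.Raise.InRange graph.length z :=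
      fun z hz => hPre graph[v] (List.getElem_mem hv) z hz
    have hEdgev : ∀ j, ((∃ x ∈ graph[v], PySem.List.pyIdx? graph.length x = some j) ↔
        pvEdge graph v j) := by
      intro j
      unfold pvEdge
      rw [List.getD_eq_getElem _ _ hv]
    rw [List.foldl_cons]
    show pvShape graph dA lvl _
      (List.foldl (pvStepNat graph (pvMapInf graph.length dA))
        (pvRoundStep graph (pvMapInf graph.length dA) new (v : Int)) rest)
    have hle_new := pvShape_le graph dA lvl hs hlvln hI1
    rcases hI1 v hv with hm | ⟨h0v, hlev⟩
    · -- source unreached: dv = INF, dv+1 beats nothing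
      have hnoop : pvRoundStep graph (pvMapInf graph.length dA) new (v : Int) = new := by
        simp only [pvRoundStep, hgetB, hgetG]
        rw [hdgB, if_pos hm]
        refine pvRelax_noop _ graph[v] new ?_
        intro nb hnb x hx
        obtain ⟨k, hk, hklt, hkv⟩ := pvGet_elim hx
        have hkn : k < graph.length := by rw [hs.1] at hklt; exact hklt
        have hxv : x = pvDget new k := by
          unfold pvDget
          rw [List.getD_eq_getElem _ _ hklt]
          exact (Option.some.inj ((List.getElem?_eq_getElem hklt) ▸ hkv)).symm
        have := hle_new k hkn
        omega
      rw [hnoop]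
      refine pvShape_congr graph dA lvl (fun j hj hj1 => ?_) (ih new S hrest hs)
      constructor
      · rintro (h | h)
        · exact Or.inl h
        · exact Or.inr ⟨_, List.mem_cons_of_mem _ h.choose_spec.1, h.choose_spec.2⟩
      · rintro (h | ⟨v', hv'm, hv'l, hv'e⟩)
        · exact Or.inl h
        · rcases List.mem_cons.mp hv'm with rfl | hr
          · exact absurd hv'l (by rw [hm]; omega)
          · exact Or.inr ⟨v', hr, hv'l, hv'e⟩
    · by_cases hveq : pvDget dA v = lvl
      · -- source at the current level: relaxations fire
        have hfire : pvRoundStep graph (pvMapInf graph.length dA) new (v : Int) =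
            pvRelax (lvl + 1) graph[v] new := by
          simp only [pvRoundStep, hgetB, hgetG]
          rw [hdgB, if_neg (by omega : ¬ pvDget dA v = -1), hveq]
        rw [hfire]
        have hlt : lvl + 1 ≤ (graph.length : Int) := hok ⟨v, hv, hveq⟩
        have hsh := pvRelax_write graph dA lvl hI1 hlt graph[v] new S hnbr_in hs
        refine pvShape_congr graph dA lvl (fun j hj hj1 => ?_) (ih _ _ hrest hsh)
        constructor
        · rintro ((h | h) | h)
          · exact Or.inl h
          · exact Or.inr ⟨v, List.mem_cons_self, hveq, (hEdgev j).mp h⟩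
          · obtain ⟨v', hv'm, hv'p⟩ := h
            exact Or.inr ⟨v', List.mem_cons_of_mem _ hv'm, hv'p⟩
        · rintro (h | ⟨v', hv'm, hv'l, hv'e⟩)
          · exact Or.inl (Or.inl h)
          · rcases List.mem_cons.mp hv'm with rfl | hr
            · exact Or.inl (Or.inr ((hEdgev j).mpr hv'e))
            · exact Or.inr ⟨v', hr, hv'l, hv'e⟩
      · -- interior source: all its edges are already relaxed
        have hltv : pvDget dA v < lvl := by omega
        have hnoop : pvRoundStep graph (pvMapInf graph.length dA) new (v : Int) = new := by
          simp only [pvRoundStep, hgetB, hgetG]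
          rw [hdgB, if_neg (by omega : ¬ pvDget dA v = -1)]
          refine pvRelax_noop _ graph[v] new ?_
          intro nb hnb x hx
          obtain ⟨k, hk, hklt, hkv⟩ := pvGet_elim hx
          have hkn : k < graph.length := by rw [hs.1] at hklt; exact hklt
          have hxv : x = pvDget new k := by
            unfold pvDget
            rw [List.getD_eq_getElem _ _ hklt]
            exact (Option.some.inj ((List.getElem?_eq_getElem hklt) ▸ hkv)).symm
          have hedge : pvEdge graph v k := by
            refine (hEdgev k).mp ⟨nb, hnb, ?_⟩
            rw [hs.1] at hk
            exact hk
          obtain ⟨hne, hub⟩ := hI3 v k hv hkn hedge h0v hltv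
          have hnewk : pvDget new k = pvDget dA k := (hs.2 k hkn).1 hne
          omega
        rw [hnoop]
        refine pvShape_congr graph dA lvl (fun j hj hj1 => ?_) (ih new S hrest hs)
        constructor
        · rintro (h | h)
          · exact Or.inl h
          · exact Or.inr ⟨_, List.mem_cons_of_mem _ h.choose_spec.1, h.choose_spec.2⟩
        · rintro (h | ⟨v', hv'm, hv'l, hv'e⟩)
          · exact Or.inl h
          · rcases List.mem_cons.mp hv'm with rfl | hr
            · exact absurd hv'l hveq
            · exact Or.inr ⟨v', hr, hv'l, hv'e⟩

-- one Bellman-Ford round on the INF view of a level-BFS state, characterized pointwise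
theorem pvRound_char (graph : List (List Int)) (hPre : Pre_find_sum_between graph)
    (dA : List Int) (lvl : Int)
    (hlen : dA.length = graph.length)
    (h0 : (0:Int) ≤ lvl) (hlvln : lvl ≤ (graph.length : Int))
    (hok : (∃ v, v < graph.length ∧ pvDget dA v = lvl) → lvl + 1 ≤ (graph.length : Int))
    (hI1 : ∀ j, j < graph.length →
      pvDget dA j = -1 ∨ (0 ≤ pvDget dA j ∧ pvDget dA j ≤ lvl))
    (hI3 : ∀ v j, v < graph.length → j < graph.length → pvEdge graph v j →
      0 ≤ pvDget dA v → pvDget dA v < lvl →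
      pvDget dA j ≠ -1 ∧ pvDget dA j ≤ pvDget dA v + 1) :
    pvShape graph dA lvl
      (fun j => ∃ v, v < graph.length ∧ pvDget dA v = lvl ∧ pvEdge graph v j)
      (pvRound graph (pvMapInf graph.length dA)) := by
  have hrange := PySem.List.pyRange_zero_nat graph.length
  have hshape0 : pvShape graph dA lvl (fun _ => False) (pvMapInf graph.length dA) := by
    refine ⟨by rw [pvMapInf_length, hlen], fun j hj => ?_⟩
    have hdg := pvDget_mapInf graph.length dA j (by omega)
    exact ⟨fun hne => by rw [hdg, if_neg hne], fun hm => ⟨fun h => absurd h (by simp),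
      fun _ => by rw [hdg, if_pos hm]⟩⟩
  have hscan := pvRound_scan graph hPre dA lvl hlen h0 hlvln hok hI1 hI3
    (List.range graph.length) (pvMapInf graph.length dA) (fun _ => False)
    (fun v hv => List.mem_range.mp hv) hshape0
  have hfold : pvRound graph (pvMapInf graph.length dA) =
      (List.range graph.length).foldl (pvStepNat graph (pvMapInf graph.length dA))
        (pvMapInf graph.length dA) := by
    unfold pvRound
    rw [hrange, List.foldl_map]
    rfl
  rw [hfold]
  refine pvShape_congr graph dA lvl (fun j hj _ => ?_) hscan
  constructor
  · rintro (h | ⟨v, hvm, hvp⟩)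
    · exact absurd h (by simp)
    · exact ⟨v, List.mem_range.mp hvm, hvp⟩
  · rintro ⟨v, hvlt, hvp⟩
    exact Or.inr ⟨v, List.mem_range.mpr hvlt, hvp⟩

-- the simulation: Bellman-Ford rounds compute the INF view of the level BFS
theorem pvSimul (graph : List (List Int)) (hPre : Pre_find_sum_between graph) :
    ∀ (fuel : Nat) (dA F : List Int) (lvl : Int),
      pvCount1 dA + 1 ≤ fuel →
      lvl + (pvCount1 dA : Int) ≤ (graph.length : Int) - 1 →
      dA.length = graph.length →
      (0:Int) ≤ lvl →
      (∀ v ∈ F, PySem.Raise.InRange graph.length v) →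
      (∀ j, j < graph.length →
        (pvDget dA j = lvl ↔ ∃ y ∈ F, PySem.List.pyIdx? graph.length y = some j)) →
      (∀ j, j < graph.length →
        pvDget dA j = -1 ∨ (0 ≤ pvDget dA j ∧ pvDget dA j ≤ lvl)) →
      (∀ v j, v < graph.length → j < graph.length → pvEdge graph v j →
        0 ≤ pvDget dA v → pvDget dA v < lvl →
        pvDget dA j ≠ -1 ∧ pvDget dA j ≤ pvDget dA v + 1) →
      pvLoop graph fuel (pvMapInf graph.length dA) =
        pvMapInf graph.length (pvLevelB graph dA F lvl) ∧
      (∀ j, j < graph.length →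
        -1 ≤ pvDget (pvLevelB graph dA F lvl) j ∧
        pvDget (pvLevelB graph dA F lvl) j ≤ (graph.length : Int)) ∧
      (pvLevelB graph dA F lvl).length = graph.length := by
  intro fuel
  induction fuel with
  | zero =>
    intro dA F lvl hfuel _ _ _ _ _ _ _
    omega
  | succ f ih =>
    intro dA F lvl hfuel hcnt hlen h0 hFr hFset hI1 hI3
    have hcnt0 : (0:Int) ≤ (pvCount1 dA : Int) := by positivity
    have hlvl1 : lvl ≤ (graph.length : Int) - 1 := by omega
    have hok : (∃ v, v < graph.length ∧ pvDget dA v = lvl) →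
        lvl + 1 ≤ (graph.length : Int) := fun _ => by omega
    have hloop : pvLoop graph (f + 1) (pvMapInf graph.length dA) =
        if pvRound graph (pvMapInf graph.length dA) = pvMapInf graph.length dA
        then pvMapInf graph.length dA
        else pvLoop graph f (pvRound graph (pvMapInf graph.length dA)) := rfl
    have hshape := pvRound_char graph hPre dA lvl hlen h0 (by omega) hok hI1 hI3
    by_cases hF : F = []
    · -- frontier exhausted: the round is a no-op and the loop breaks
      subst hF
      have hlevel : pvLevelB graph dA [] lvl = dA := by rw [pvLevelB_eq]; simp
      have hnoop : pvRound graph (pvMapInf graph.length dA) = pvMapInf graph.length dA := by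
        refine pvDget_ext (by rw [hshape.1, pvMapInf_length, hlen]) ?_
        intro j hjl
        have hj : j < graph.length := by rw [hshape.1] at hjl; exact hjl
        have hmj := pvDget_mapInf graph.length dA j (by omega)
        by_cases hm : pvDget dA j = -1
        · have hS : ¬ ∃ v, v < graph.length ∧ pvDget dA v = lvl ∧ pvEdge graph v j := by
            rintro ⟨v, hvlt, hvl, _⟩
            obtain ⟨y, hym, _⟩ := (hFset v hvlt).mp hvl
            exact absurd hym (List.not_mem_nil)
          rw [((hshape.2 j hj).2 hm).2 hS, hmj, if_pos hm]
        · rw [(hshape.2 j hj).1 hm, hmj, if_neg hm]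
      rw [hloop, if_pos hnoop, hlevel]
      refine ⟨rfl, ?_, hlen⟩
      intro j hj
      rcases hI1 j hj with h | h <;> omega
    · -- frontier nonempty: one round = one level
      obtain ⟨d', nxt, hrec, hlen', hpt, hnxtIR, hiff⟩ :=
        pvFrontB_char graph hPre (lvl + 1) (by omega) F dA hlen hFr
      have hlevel : pvLevelB graph dA F lvl = pvLevelB graph d' nxt (lvl + 1) := by
        rw [pvLevelB_eq, if_neg hF, if_pos h0, hrec]
      have hHitIff : ∀ j, ((∃ v, v < graph.length ∧ pvDget dA v = lvl ∧ pvEdge graph v j) ↔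
          pvHit graph F j) := by
        intro j
        constructor
        · rintro ⟨v, hvlt, hvl, hve⟩
          obtain ⟨y, hym, hyi⟩ := (hFset v hvlt).mp hvl
          exact ⟨y, hym, v, hyi, hve⟩
        · rintro ⟨y, hym, jv, hyi, hve⟩
          exact ⟨jv, pvIdx_lt hyi, (hFset jv (pvIdx_lt hyi)).mpr ⟨y, hym, hyi⟩, hve⟩
      have hround : pvRound graph (pvMapInf graph.length dA) = pvMapInf graph.length d' := by
        refine pvDget_ext (by rw [hshape.1, pvMapInf_length, hlen']; omega) ?_
        intro j hjl
        have hj : j < graph.length := by rw [hshape.1] at hjl; exact hjl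
        have hmj := pvDget_mapInf graph.length d' j (by omega)
        by_cases hm : pvDget dA j = -1
        · by_cases hhit : pvHit graph F j
          · have hd'j : pvDget d' j = lvl + 1 := (hpt j hj).1 ⟨hm, hhit⟩
            rw [((hshape.2 j hj).2 hm).1 ((hHitIff j).mpr hhit), hmj, hd'j,
              if_neg (by omega)]
          · have hd'j : pvDget d' j = pvDget dA j := (hpt j hj).2 (fun h => hhit h.2)
            rw [((hshape.2 j hj).2 hm).2 (fun h => hhit ((hHitIff j).mp h)), hmj, hd'j,
              if_pos hm]
        · have hd'j : pvDget d' j = pvDget dA j := (hpt j hj).2 (fun h => hm h.1)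
          rw [(hshape.2 j hj).1 hm, hmj, hd'j, if_neg hm]
      by_cases hnxt : nxt = []
      · -- nothing written: fixpoint reached, and the BFS also stops next level
        subst hnxt
        have hd'dA : d' = dA := by
          refine pvDget_ext (by omega) ?_
          intro j hjl
          have hj : j < graph.length := by rw [hlen'] at hjl; rw [hlen] at hjl; exact hjl
          refine (hpt j hj).2 ?_
          intro hc
          obtain ⟨y, hym, _⟩ := (hiff j hj).mpr hc
          exact absurd hym (List.not_mem_nil)
        have hfix : pvRound graph (pvMapInf graph.length dA) = pvMapInf graph.length dA := by
          rw [hround, hd'dA]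
        have hlevel2 : pvLevelB graph d' [] (lvl + 1) = dA := by
          rw [pvLevelB_eq]; simp [hd'dA]
        rw [hloop, if_pos hfix, hlevel, hlevel2]
        refine ⟨rfl, ?_, by rw [hlen]⟩
        intro j hj
        rcases hI1 j hj with h | h <;> omega
      · -- something was written: no fixpoint, recurse one level deeper
        have hcount := pvFrontB_cnt graph (lvl + 1) (by omega) F dA [] d' nxt hrec
        simp only [List.length_nil, Nat.add_zero] at hcount
        have hnlen : 1 ≤ nxt.length := List.length_pos_of_ne_nil hnxt
        obtain ⟨y, hym⟩ : ∃ y, y ∈ nxt := by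
          cases nxt with
          | nil => exact absurd rfl hnxt
          | cons a tl => exact ⟨a, List.mem_cons_self⟩
        obtain ⟨j0, hj0, hj0lt⟩ := pvIdx_of_InRange (hnxtIR y hym)
        have hcond := (hiff j0 hj0lt).mp ⟨y, hym, hj0⟩
        have hd'j0 : pvDget d' j0 = lvl + 1 := (hpt j0 hj0lt).1 hcond
        have hne : pvRound graph (pvMapInf graph.length dA) ≠ pvMapInf graph.length dA := by
          rw [hround]
          intro he
          have := congrArg (fun d => pvDget d j0) he
          simp only at this
          rw [pvDget_mapInf graph.length d' j0 (by omega),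
            pvDget_mapInf graph.length dA j0 (by omega)] at this
          rw [hd'j0, if_neg (by omega), hcond.1, if_pos rfl] at this
          omega
        have ihres := ih d' nxt (lvl + 1) (by omega) (by omega)
          (by omega) (by omega) hnxtIR ?_ ?_ ?_
        · rw [hloop, if_neg hne, hround, hlevel]
          exact ihres
        · -- the next level set is exactly nxt
          intro j hj
          constructor
          · intro hje
            by_cases hc : pvDget dA j = -1 ∧ pvHit graph F j
            · exact (hiff j hj).mpr hc
            · rw [(hpt j hj).2 hc] at hje
              rcases hI1 j hj with h | h <;> omega
          · rintro ⟨z, hzm, hzi⟩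
            exact (hpt j hj).1 ((hiff j hj).mp ⟨z, hzm, hzi⟩)
        · -- value range at the next level
          intro j hj
          by_cases hc : pvDget dA j = -1 ∧ pvHit graph F j
          · rw [(hpt j hj).1 hc]; omega
          · rw [(hpt j hj).2 hc]
            rcases hI1 j hj with h | h
            · exact Or.inl h
            · exact Or.inr ⟨h.1, by omega⟩
        · -- edges out of interior vertices stay relaxed
          intro v j hvlt hjlt hve h0v hltv
          have hncv : ¬ (pvDget dA v = -1 ∧ pvHit graph F v) := by
            rintro ⟨hcv, hhv⟩
            rw [(hpt v hvlt).1 ⟨hcv, hhv⟩] at hltv h0v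
            omega
          have hd'v : pvDget d' v = pvDget dA v := (hpt v hvlt).2 hncv
          rw [hd'v] at h0v hltv
          by_cases hveq : pvDget dA v = lvl
          · -- v is on the frontier level: its edges were just relaxed
            have hhitj : pvHit graph F j := by
              obtain ⟨z, hzm, hzi⟩ := (hFset v hvlt).mp hveq
              exact ⟨z, hzm, v, hzi, hve⟩
            by_cases hmj : pvDget dA j = -1
            · have : pvDget d' j = lvl + 1 := (hpt j hjlt).1 ⟨hmj, hhitj⟩
              rw [this, hd'v, hveq]
              exact ⟨by omega, by omega⟩
            · have : pvDget d' j = pvDget dA j := (hpt j hjlt).2 (fun h => hmj h.1)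
              rw [this, hd'v]
              rcases hI1 j hjlt with h | h
              · exact absurd h hmj
              · exact ⟨by omega, by omega⟩
          · -- v is interior: the old invariant applies
            have hint := hI3 v j hvlt hjlt hve h0v (by omega)
            have : pvDget d' j = pvDget dA j := (hpt j hjlt).2 (fun h => hint.1 h.1)
            rw [this, hd'v]
            exact hint

-- the INF-view sum with the < INF test equals the plain sum of the -1 view
theorem pvSum_mapInf (n : Nat) (d : List Int)
    (hb : ∀ j, j < d.length → -1 ≤ pvDget d j ∧ pvDget d j ≤ (n : Int)) :
    (pvMapInf n d).foldl (fun acc x => acc + (if x < (n : Int) + 1 then x else -1)) 0 =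
      d.sum := by
  have hmem : ∀ x ∈ d, -1 ≤ x ∧ x ≤ (n : Int) := by
    intro x hx
    obtain ⟨j, hj, he⟩ := pvMem_dget hx
    rw [← he]
    exact hb j hj
  have haux : ∀ (e : List Int) (acc : Int), (∀ x ∈ e, -1 ≤ x ∧ x ≤ (n : Int)) →
      (pvMapInf n e).foldl (fun acc x => acc + (if x < (n : Int) + 1 then x else -1)) acc =
        e.foldl (· + ·) acc := by
    intro e
    induction e with
    | nil => intro acc _; simp [pvMapInf]
    | cons x rest ih =>
      intro acc he
      have hx := he x List.mem_cons_self
      simp only [pvMapInf, List.map_cons, List.foldl_cons]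
      by_cases hm : x = -1
      · rw [if_pos hm, if_neg (by omega), hm]
        exact ih (acc + -1) (fun z hz => he z (List.mem_cons_of_mem _ hz))
      · rw [if_neg hm, if_pos (by omega)]
        exact ih (acc + x) (fun z hz => he z (List.mem_cons_of_mem _ hz))
  rw [haux d 0 hmem, List.sum_eq_foldl]

-- per-vertex: Bellman-Ford source value = BFS source value
theorem pvSource_eq (graph : List (List Int)) (hPre : Pre_find_sum_between graph)
    (u : Int) (hu0 : (0:Int) ≤ u) (hun : u < (graph.length : Int)) :
    (pvLoop graph graph.length
        (PySem.List.pySetD (List.replicate graph.length ((graph.length : Int) + 1)) u 0)).foldl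
      (fun acc d => acc + (if d < (graph.length : Int) + 1 then d else -1)) 0 =
      (pvLevelB graph (PySem.List.pySetD (List.replicate graph.length (-1)) u 0) [u] 0).sum := by
  have hn1 : 1 ≤ graph.length := by omega
  have hidx : PySem.List.pyIdx? graph.length u = some u.toNat := by
    simp only [PySem.List.pyIdx?]
    rw [if_pos hu0, if_pos hun]
  have hidxA : PySem.List.pyIdx? (List.replicate graph.length (-1 : Int)).length u
      = some u.toNat := by rw [List.length_replicate]; exact hidx
  have hidxB : PySem.List.pyIdx?
      (List.replicate graph.length ((graph.length : Int) + 1)).length u = some u.toNat := by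
    rw [List.length_replicate]; exact hidx
  have hulen : u.toNat < graph.length := by omega
  set dA := PySem.List.pySetD (List.replicate graph.length (-1 : Int)) u 0 with hdA
  have hlenA : dA.length = graph.length := by
    rw [hdA, PySem.List.length_pySetD, List.length_replicate]
  -- the two initial arrays are INF-views of each other
  have hmap : PySem.List.pySetD (List.replicate graph.length ((graph.length : Int) + 1)) u 0 =
      pvMapInf graph.length dA := by
    rw [hdA, pvSetD_eq 0 hidxA, pvSetD_eq 0 hidxB]
    unfold pvMapInf
    rw [List.map_set, List.map_replicate]
    norm_num
  -- pointwise description of the initial array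
  have hdgA : ∀ j, j < graph.length →
      pvDget dA j = if j = u.toNat then 0 else -1 := by
    intro j hj
    rw [hdA, pvSetD_dget 0 hidxA j]
    by_cases hjj : j = u.toNat
    · rw [if_pos hjj, if_pos hjj]
    · rw [if_neg hjj, if_neg hjj]
      unfold pvDget
      rw [List.getD_eq_getElem _ _ (by rw [List.length_replicate]; exact hj)]
      simp
  -- one cell was consumed by the source
  have hgetr : PySem.List.pyGet? (List.replicate graph.length (-1 : Int)) u = some (-1) := by
    simp only [PySem.List.pyGet?, hidxA, Option.bind_some]
    rw [List.getElem?_eq_getElem (by rw [List.length_replicate]; exact hulen)]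
    simp
  have hcnt1 : pvCount1 dA + 1 = graph.length := by
    have := pvCount1_pySetD (List.replicate graph.length (-1)) u 0 hgetr (by omega)
    rw [← hdA] at this
    rw [this]
    unfold pvCount1
    simp [pvCount1]
  have hsim := pvSimul graph hPre graph.length dA [u] 0 (by omega)
    (by omega) hlenA (by omega)
    (by intro v hv; rw [List.mem_singleton.mp hv]; exact ⟨by omega, hun⟩)
    ?_ ?_ ?_
  · obtain ⟨hloop, hbound, hlenF⟩ := hsim
    rw [hmap, hloop]
    exact pvSum_mapInf graph.length _ (by rw [hlenF]; exact hbound)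
  · -- the singleton frontier is exactly the level-0 set
    intro j hj
    rw [hdgA j hj]
    constructor
    · intro hje
      have hju : j = u.toNat := by
        by_contra hne
        rw [if_neg hne] at hje
        omega
      exact ⟨u, List.mem_singleton_self u, by rw [hidx, hju]⟩
    · rintro ⟨y, hym, hyi⟩
      rw [List.mem_singleton.mp hym] at hyi
      rw [hidx] at hyi
      rw [if_pos (Option.some.inj hyi).symm]
  · intro j hj
    rw [hdgA j hj]
    by_cases hjj : j = u.toNat
    · rw [if_pos hjj]; omega
    · rw [if_neg hjj]; omega
  · intro v j _ _ _ h0v hltv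
    omega

theorem pv_main (graph : List (List Int)) (hPre : Pre_find_sum_between graph) :
    find_sum_between graph = find_sum_between_alt graph := by
  unfold find_sum_between find_sum_between_alt
  apply congrArg (fun t : Int => PySem.Int.floordiv t 2)
  apply PySem.List.foldl_congr_mem
  intro acc u hu
  have hm := PySem.List.mem_pyRange_one.mp hu
  rw [pvBfs_eq graph u hm.1 hm.2, ← pvSource_eq graph hPre u hm.1 hm.2]

-- ===== VERDICT (by name: the statement is the Claim_ definition above) =====
theorem find_sum_between_spec : Claim_equal_find_sum_between := by
  intro graph _ hPre
  unfold Spec_find_sum_between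
  exact pv_main graph hPre
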